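-- pv_equiv track=rewrite | github.com/Pongsakron007/github-exercise-problem-btd | 1 of member lower than sum of rest_2star.py | check
-- ===== SOURCE A (Python) =====
-- def check(get):
--   for idx,i in enumerate(get):
--     num = get.pop(idx)
--     if num < sum(get):
--       get.insert(0,num)
--       continue
--     else:
--       return False
--   return True
-- ===== SOURCE B (Python) =====
-- def check(get):
--     # Only the maximum element can fail "element < sum of the rest",
--     # so one max+sum scan decides the whole question.
--     if not get:
--         return True
--     return 2 * max(get) < sum(get)
-- ===== Notes on version B (the rewrite author's own statement) =====
-- stated objective: simpler
-- what changed: A's rotating pop/insert loop that re-sums the rest for every element is replaced by the closed-form criterion 2*max(get) < sum(get) (only the maximum can violate 'element < sum of the rest'), with True on the empty list; note A mutates its argument while B does not (return value only).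
import Mathlib
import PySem

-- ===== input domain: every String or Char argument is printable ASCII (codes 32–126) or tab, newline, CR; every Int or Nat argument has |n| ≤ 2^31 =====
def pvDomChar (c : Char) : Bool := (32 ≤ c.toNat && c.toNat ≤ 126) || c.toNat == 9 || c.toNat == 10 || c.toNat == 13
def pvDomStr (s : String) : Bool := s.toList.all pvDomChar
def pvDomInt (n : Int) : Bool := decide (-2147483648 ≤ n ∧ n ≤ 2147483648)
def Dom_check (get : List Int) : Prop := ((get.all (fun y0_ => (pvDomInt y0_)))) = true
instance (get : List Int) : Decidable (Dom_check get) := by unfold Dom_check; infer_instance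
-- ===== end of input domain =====

-- B replaces A's per-element pop/re-sum loop by the single test 2*max < sum (simpler, and about
-- the RETURN value only: A mutates its argument in place, B does not).

-- ===== PORT A =====
-- the for/enumerate loop over the live (mutating) list: at index idx, pop, test against the
-- sum of the rest, re-insert at the front on success; the loop ends when idx reaches len.
def checkLoop (idx : Nat) (lst : List Int) : Bool :=
  if h : idx < lst.length then
    match h2 : PySem.List.pop? lst (idx : Int) with
    | none => false  -- unreachable: idx is in range
    | some (num, rest) =>
      if num < rest.sum then checkLoop (idx + 1) (PySem.List.insert rest 0 num)
      else false
  else true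
termination_by lst.length - idx
decreasing_by
  have := PySem.List.length_of_pop?_eq_some lst h2
  simp only [PySem.List.insert_zero, List.length_cons] at *
  omega

def check (get : List Int) : Bool := checkLoop 0 get

-- ===== PORT B =====
def check_alt (get : List Int) : Bool :=
  match PySem.List.max? get id with
  | none => true
  | some m => decide (2 * m < get.sum)

-- ===== PRECONDITION & SPEC =====
def Spec_check (get : List Int) (out : Bool) : Prop := out = check_alt get
instance (get : List Int) (out : Bool) : Decidable (Spec_check get out) := by unfold Spec_check; infer_instance

-- ===== CLAIM (what is proved, stated in full; the proofs are below) =====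
def Claim_equal_check : Prop := ∀ (get : List Int), Dom_check get → Spec_check get (check get)

-- ===== LEMMAS AND PROOFS =====

lemma sum_eraseIdx_int (l : List Int) (i : Nat) (h : i < l.length) :
    (l.eraseIdx i).sum = l.sum - l[i] := by
  induction l generalizing i with
  | nil => simp at h
  | cons x xs ih =>
    cases i with
    | zero => simp [List.eraseIdx]
    | succ j =>
      have h' : j < xs.length := by simpa using h
      simp only [List.eraseIdx_cons_succ, List.sum_cons, ih j h', List.getElem_cons_succ]
      ring

lemma loop_eq (n : Nat) : ∀ (idx : Nat) (lst : List Int), lst.length - idx = n →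
    checkLoop idx lst =
      decide (∀ j, ∀ h : j < lst.length, idx ≤ j → 2 * lst[j] < lst.sum) := by
  induction n with
  | zero =>
    intro idx lst hn
    rw [checkLoop.eq_def]
    have hge : ¬ idx < lst.length := by omega
    simp only [hge, dif_neg, not_false_iff]
    symm; simp only [decide_eq_true_eq]
    intro j h hj; omega
  | succ n ih =>
    intro idx lst hn
    have hlt : idx < lst.length := by omega
    have hstep : checkLoop idx lst =
        (if lst[idx] < (lst.eraseIdx idx).sum then
          checkLoop (idx + 1) (PySem.List.insert (lst.eraseIdx idx) 0 lst[idx])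
        else false) := by
      rw [checkLoop.eq_def]
      simp only [hlt, dif_pos]
      split
      next heq =>
        rw [PySem.List.pop?_natCast lst idx hlt] at heq
        simp at heq
      next num rest heq =>
        rw [PySem.List.pop?_natCast lst idx hlt] at heq
        simp only [Option.some.injEq, Prod.mk.injEq] at heq
        obtain ⟨rfl, rfl⟩ := heq
        rfl
    rw [hstep]
    have hsum : (lst.eraseIdx idx).sum = lst.sum - lst[idx] := sum_eraseIdx_int lst idx hlt
    by_cases hc : lst[idx] < (lst.eraseIdx idx).sum
    · simp only [hc, if_pos]
      set lst' := PySem.List.insert (lst.eraseIdx idx) 0 lst[idx] with hlst'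
      have hins : lst' = lst[idx] :: lst.eraseIdx idx := PySem.List.insert_zero _ _
      have hlen' : lst'.length = lst.length := by
        rw [hins]; simp [List.length_eraseIdx, hlt]; omega
      have hsum' : lst'.sum = lst.sum := by
        rw [hins]; simp [hsum]
      have hget' : ∀ j, idx + 1 ≤ j → ∀ h : j < lst'.length, lst'[j] = lst[j]'(by omega) := by
        intro j hj h
        obtain ⟨k, rfl⟩ : ∃ k, j = k + 1 := ⟨j - 1, by omega⟩
        have e1 := List.getElem_of_eq hins h
        rw [e1]
        simp only [List.getElem_cons_succ, List.getElem_eraseIdx]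
        rw [dif_neg (by omega : ¬ k < idx)]
      rw [ih (idx + 1) lst' (by omega)]
      apply decide_eq_decide.mpr
      constructor
      · intro hall j h hj
        by_cases hje : j = idx
        · subst hje; omega
        · have h' : j < lst'.length := by omega
          have := hall j h' (by omega)
          rw [hget' j (by omega) h', hsum'] at this
          exact this
      · intro hall j h hj
        have h2 : j < lst.length := by omega
        have := hall j h2 (by omega)
        rw [hget' j hj h, hsum']
        exact this
    · simp only [hc, if_neg, not_false_iff]
      symm; rw [decide_eq_false_iff_not]
      push Not
      exact ⟨idx, hlt, le_refl _, by omega⟩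

lemma check_eq_forall (get : List Int) :
    check get = decide (∀ j, ∀ h : j < get.length, 2 * get[j] < get.sum) := by
  rw [check, loop_eq (get.length) 0 get (by omega)]
  apply decide_eq_decide.mpr
  constructor
  · intro hall j h; exact hall j h (Nat.zero_le _)
  · intro hall j h _; exact hall j h

-- ===== VERDICT (by name: the statement is the Claim_ definition above) =====
theorem check_spec : Claim_equal_check := by
  intro get _
  unfold Spec_check check_alt
  rw [check_eq_forall]
  cases hm : PySem.List.max? get id with
  | none =>
    have : get = [] := (PySem.List.max?_eq_none_iff get id).mp hm
    subst this; simp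
  | some m =>
    have hmem : m ∈ get := PySem.List.max?_mem hm
    have hmax : ∀ y ∈ get, y ≤ m := by
      intro y hy; exact PySem.List.max?_isMax hm y hy
    apply decide_eq_decide.mpr
    constructor
    · intro hall
      obtain ⟨j, hj, hje⟩ := List.mem_iff_getElem.mp hmem
      have := hall j hj
      omega
    · intro hlt j h
      have := hmax get[j] (List.getElem_mem h)
      omega
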